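-- pv_equiv track=rewrite | github.com/FangyunWei/PointSetAnchor | mmdet/core/anchor/point_set_anchor_target.py | images_to_levels_by_list
-- ===== SOURCE A (Python) =====
-- def images_to_levels_by_list(target, num_level_anchors):
--     """Convert targets by image to targets by feature level.
--
--     [target_img0, target_img1] -> [target_level0, target_level1, ...]
--     """
--     # concat all lists in target
--     level_targets = []
--     start = 0
--     for n in num_level_anchors:
--         end = start + n
--         current_target = []
--         for t in target:
--             current_target.extend(t[start:end])
--         level_targets.append(current_target)
--         start = end
--     return level_targets
-- ===== SOURCE B (Python) =====
-- def images_to_levels_by_list(target, num_level_anchors):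
--     """Convert targets by image to targets by feature level.
--
--     Transposed traversal: compute the per-level slice bounds once, preallocate
--     one accumulator per level, then walk the images once, appending each
--     image's per-level chunk to its level's accumulator.
--     """
--     bounds = []
--     start = 0
--     for n in num_level_anchors:
--         bounds.append((start, start + n))
--         start += n
--     levels = [[] for _ in num_level_anchors]
--     for t in target:
--         for lvl, (s, e) in zip(levels, bounds):
--             lvl += t[s:e]
--     return levels
-- ===== Notes on version B (the rewrite author's own statement) =====
-- stated objective: alternative
-- what changed: Replaces A's level-outer/image-inner loop with recomputed running offsets by a transposed traversal: per-level bounds are computed once up front, per-level accumulators are preallocated, and a single image-outer pass distributes each image's chunks into the level accumulators.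
import Mathlib
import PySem

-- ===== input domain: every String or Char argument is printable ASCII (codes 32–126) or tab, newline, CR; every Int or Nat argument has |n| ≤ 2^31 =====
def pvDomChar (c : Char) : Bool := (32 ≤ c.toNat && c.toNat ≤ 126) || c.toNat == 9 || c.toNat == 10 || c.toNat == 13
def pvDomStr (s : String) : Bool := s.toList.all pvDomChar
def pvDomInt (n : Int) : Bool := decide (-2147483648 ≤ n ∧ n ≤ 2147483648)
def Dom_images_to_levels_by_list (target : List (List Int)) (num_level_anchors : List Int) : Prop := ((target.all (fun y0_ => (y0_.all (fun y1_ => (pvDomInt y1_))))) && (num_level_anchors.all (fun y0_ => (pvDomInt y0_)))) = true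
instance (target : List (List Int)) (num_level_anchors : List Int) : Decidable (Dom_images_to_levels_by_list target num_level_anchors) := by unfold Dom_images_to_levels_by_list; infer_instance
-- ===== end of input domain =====

-- B regroups per-image targets into per-level lists by a transposed traversal: per-level bounds precomputed once, then one image-outer pass distributes each image's chunks into preallocated per-level accumulators (alternative decomposition, same cost).


-- ===== PORT A =====
def images_to_levels_by_list (target : List (List Int)) (num_level_anchors : List Int) : List (List Int) :=
  -- level_targets = []; start = 0; for n in num_level_anchors: …
  (num_level_anchors.foldl
    (fun (acc : List (List Int) × Int) n =>
      let start := acc.2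
      let stop := start + n
      let current_target :=
        target.foldl (fun c t => c ++ PySem.List.slice t (some start) (some stop)) []
      (acc.1 ++ [current_target], stop))
    ([], 0)).1

-- ===== PORT B =====
def images_to_levels_by_list_alt (target : List (List Int)) (num_level_anchors : List Int) : List (List Int) :=
  -- bounds built with a running offset
  let bounds :=
    (num_level_anchors.foldl
      (fun (acc : List (Int × Int) × Int) n => (acc.1 ++ [(acc.2, acc.2 + n)], acc.2 + n))
      ([], 0)).1
  -- levels = [[] for _ in num_level_anchors]
  let levels0 : List (List Int) := num_level_anchors.map (fun _ => [])
  -- for t in target: for lvl, (s, e) in zip(levels, bounds): lvl += t[s:e]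
  target.foldl
    (fun levels t =>
      (levels.zip bounds).map (fun q => q.1 ++ PySem.List.slice t (some q.2.1) (some q.2.2)))
    levels0

-- ===== PRECONDITION & SPEC =====
def Spec_images_to_levels_by_list (target : List (List Int)) (num_level_anchors : List Int) (out : List (List Int)) : Prop := out = images_to_levels_by_list_alt target num_level_anchors
instance (target : List (List Int)) (num_level_anchors : List Int) (out : List (List Int)) : Decidable (Spec_images_to_levels_by_list target num_level_anchors out) := by unfold Spec_images_to_levels_by_list; infer_instance

-- ===== CLAIM (what is proved, stated in full; the proofs are below) =====
def Claim_equal_images_to_levels_by_list : Prop := ∀ (target : List (List Int)) (num_level_anchors : List Int), Dom_images_to_levels_by_list target num_level_anchors → Spec_images_to_levels_by_list target num_level_anchors (images_to_levels_by_list target num_level_anchors)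

-- ===== LEMMAS AND PROOFS =====

/-- The (start, end) pairs both programs walk through, as a recursive list. -/
def pvBounds : List Int → Int → List (Int × Int)
  | [], _ => []
  | n :: ns, s => (s, s + n) :: pvBounds ns (s + n)

theorem pvBounds_fold (nla : List Int) (acc : List (Int × Int)) (s : Int) :
    (nla.foldl (fun (a : List (Int × Int) × Int) n => (a.1 ++ [(a.2, a.2 + n)], a.2 + n)) (acc, s)).1
      = acc ++ pvBounds nla s := by
  induction nla generalizing acc s with
  | nil => simp [pvBounds]
  | cons n ns ih => simp [List.foldl_cons, pvBounds, ih]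

theorem pvA_fold (target : List (List Int)) (nla : List Int) (acc : List (List Int)) (s : Int) :
    (nla.foldl
      (fun (a : List (List Int) × Int) n =>
        (a.1 ++ [target.flatMap (fun t => PySem.List.slice t (some a.2) (some (a.2 + n)))], a.2 + n))
      (acc, s)).1
      = acc ++ (pvBounds nla s).map
          (fun p => target.flatMap (fun t => PySem.List.slice t (some p.1) (some p.2))) := by
  induction nla generalizing acc s with
  | nil => simp [pvBounds]
  | cons n ns ih => simp [List.foldl_cons, pvBounds, ih]

theorem pvBounds_length (nla : List Int) (s : Int) : (pvBounds nla s).length = nla.length := by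
  induction nla generalizing s with
  | nil => rfl
  | cons n ns ih => simp [pvBounds, ih]

theorem pvB_len (target : List (List Int)) (L : List (Int × Int)) (levels : List (List Int)) :
    (target.foldl
      (fun levels t =>
        (levels.zip L).map (fun q => q.1 ++ PySem.List.slice t (some q.2.1) (some q.2.2)))
      levels).length = if target = [] then levels.length else min levels.length L.length := by
  induction target generalizing levels with
  | nil => simp
  | cons t ts ih =>
      simp only [List.foldl_cons, ih]
      split <;> simp [List.length_zip]

theorem pvB_elem (target : List (List Int)) (L : List (Int × Int)) (levels : List (List Int))
    (i : Nat) (hi : i < levels.length) (hL : i < L.length) :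
    ∀ h, (target.foldl
      (fun levels t =>
        (levels.zip L).map (fun q => q.1 ++ PySem.List.slice t (some q.2.1) (some q.2.2)))
      levels)[i]'h
      = levels[i] ++ target.flatMap (fun t => PySem.List.slice t (some L[i].1) (some L[i].2)) := by
  induction target generalizing levels with
  | nil => intro h; simp
  | cons t ts ih =>
      intro h
      simp only [List.foldl_cons] at h ⊢
      rw [ih ((levels.zip L).map (fun q => q.1 ++ PySem.List.slice t (some q.2.1) (some q.2.2)))
            (by simp [List.length_zip]; omega)]
      simp [List.getElem_zip, List.flatMap_cons]

-- ===== VERDICT (by name: the statement is the Claim_ definition above) =====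
theorem images_to_levels_by_list_spec : Claim_equal_images_to_levels_by_list := by
  intro target nla _
  unfold Spec_images_to_levels_by_list images_to_levels_by_list images_to_levels_by_list_alt
  simp only [PySem.List.foldl_append_eq_flatMap, List.nil_append]
  rw [pvA_fold, pvBounds_fold]
  simp only [List.nil_append]
  apply List.ext_getElem
  · rw [pvB_len]
    split
    · rename_i h; subst h; simp [pvBounds_length]
    · simp [pvBounds_length]
  · intro i h1 h2
    have hn : i < nla.length := by simpa [pvBounds_length] using h1
    rw [pvB_elem _ _ _ i (by simpa using hn) (by simpa [pvBounds_length] using hn)]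
    simp
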